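-- pv_equiv track=rewrite | github.com/layola13/minir | mimir/conversation_skeleton.py | _build_package
-- ===== SOURCE A (Python) =====
-- from typing import Dict, List, Sequence, Tuple
--
-- def _build_package(preview: str) -> Dict[str, str]:
--     package: Dict[str, str] = {}
--     current_name = None
--     current_lines: List[str] = []
--     for line in preview.splitlines():
--         if line.startswith("# ") and line.endswith(".py"):
--             if current_name is not None:
--                 package[current_name] = "\n".join(current_lines).strip() + "\n"
--             current_name = line[2:]
--             current_lines = []
--             continue
--         current_lines.append(line)
--     if current_name is not None:
--         package[current_name] = "\n".join(current_lines).strip() + "\n"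
--     return package
-- ===== SOURCE B (Python) =====
-- def _build_package(preview: str):
--     def is_header(ln):
--         return ln.startswith("# ") and ln.endswith(".py")
--
--     lines = preview.splitlines()
--     package = {}
--     # skip any lines before the first header
--     i = 0
--     while i < len(lines) and not is_header(lines[i]):
--         i += 1
--     rest = lines[i:]
--     # repeatedly peel off one header block: header line, then body up to next header
--     while rest:
--         name = rest[0][2:]
--         k = 1
--         while k < len(rest) and not is_header(rest[k]):
--             k += 1
--         package[name] = "\n".join(rest[1:k]).strip() + "\n"
--         rest = rest[k:]
--     return package
-- ===== Notes on version B (the rewrite author's own statement) =====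
-- stated objective: alternative
-- what changed: Instead of one streaming pass carrying current_name/current_lines state with flushes at each header and at the end, B skips the pre-header prefix and then repeatedly peels off whole header blocks (header line plus the body slice up to the next header), inserting each block directly.
import Mathlib
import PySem

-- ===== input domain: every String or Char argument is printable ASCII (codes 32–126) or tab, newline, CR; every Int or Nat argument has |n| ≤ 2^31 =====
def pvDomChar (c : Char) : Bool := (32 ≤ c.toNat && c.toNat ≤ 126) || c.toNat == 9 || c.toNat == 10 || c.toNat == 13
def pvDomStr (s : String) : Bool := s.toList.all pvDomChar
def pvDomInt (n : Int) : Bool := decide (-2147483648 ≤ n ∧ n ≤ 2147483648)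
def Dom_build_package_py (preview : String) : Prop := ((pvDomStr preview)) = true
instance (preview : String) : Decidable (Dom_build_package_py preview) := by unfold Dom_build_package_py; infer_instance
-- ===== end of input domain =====

-- B replaces A's streaming pass (current_name/current_lines state with flushes) by peeling off
-- whole header blocks after skipping the pre-header prefix; same cost, alternative decomposition.

def pvIsHeader (ln : String) : Bool :=
  PySem.Str.startswith ln "# " && PySem.Str.endswith ln ".py"

def pvEntry (cl : List String) : String :=
  PySem.Str.strip (PySem.Str.join "\n" cl) ++ "\n"

-- ===== PORT A =====
-- the for-loop of A, state = (package, current_name, current_lines); base case = the final flush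
def pvLoopA : List String → PySem.Dict String String → Option String → List String →
    PySem.Dict String String
  | [], pkg, cur, cl =>
      match cur with
      | none => pkg
      | some n => pkg.insert n (pvEntry cl)
  | l :: ls, pkg, cur, cl =>
      if pvIsHeader l then
        let pkg' := match cur with
          | none => pkg
          | some n => pkg.insert n (pvEntry cl)
        pvLoopA ls pkg' (some (PySem.Str.slice l (some 2) none)) []
      else
        pvLoopA ls pkg cur (cl ++ [l])

def build_package_py (preview : String) : List (String × String) :=
  (pvLoopA (PySem.Str.splitlines preview) PySem.Dict.empty none []).items

-- ===== PORT B =====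
-- B's inner while loop: split off the body lines before the next header ((rest[1:k], rest[k:]))
def pvSpanB : List String → List String × List String
  | [] => ([], [])
  | l :: tl =>
      if pvIsHeader l then ([], l :: tl)
      else
        let p := pvSpanB tl
        (l :: p.1, p.2)

-- B's first while loop: skip lines before the first header (lines[i:])
def pvSkipB : List String → List String
  | [] => []
  | l :: tl => if pvIsHeader l then l :: tl else pvSkipB tl

theorem pvSpanB_snd_length (ls : List String) : (pvSpanB ls).2.length ≤ ls.length := by
  induction ls with
  | nil => simp [pvSpanB]
  | cons l tl ih =>
      simp only [pvSpanB]
      split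
      · simp
      · simp
        omega

-- B's outer while loop over the remaining blocks
def pvGoB : List String → PySem.Dict String String → PySem.Dict String String
  | [], pkg => pkg
  | h :: tl, pkg =>
      let name := PySem.Str.slice h (some 2) none
      let body := (pvSpanB tl).1
      let rest := (pvSpanB tl).2
      pvGoB rest (pkg.insert name (pvEntry body))
  termination_by ls _ => ls.length
  decreasing_by
    exact Nat.lt_succ_of_le (pvSpanB_snd_length tl)

def build_package_py_alt (preview : String) : List (String × String) :=
  (pvGoB (pvSkipB (PySem.Str.splitlines preview)) PySem.Dict.empty).items

-- ===== PRECONDITION & SPEC =====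
def Spec_build_package_py (preview : String) (out : List (String × String)) : Prop := out = build_package_py_alt preview
instance (preview : String) (out : List (String × String)) : Decidable (Spec_build_package_py preview out) := by unfold Spec_build_package_py; infer_instance

-- ===== CLAIM (what is proved, stated in full; the proofs are below) =====
def Claim_equal_build_package_py : Prop := ∀ (preview : String), Dom_build_package_py preview → Spec_build_package_py preview (build_package_py preview)

-- ===== LEMMAS AND PROOFS =====

-- with a current file open, A finishes that block exactly as B's span does
theorem pvLoopA_some (ls : List String) :
    ∀ (pkg : PySem.Dict String String) (name : String) (cl : List String),
    pvLoopA ls pkg (some name) cl =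
      pvGoB (pvSpanB ls).2 (pkg.insert name (pvEntry (cl ++ (pvSpanB ls).1))) := by
  induction ls with
  | nil => intro pkg name cl; simp [pvLoopA, pvSpanB, pvGoB]
  | cons l tl ih =>
      intro pkg name cl
      by_cases h : pvIsHeader l = true
      · simp [pvLoopA, pvSpanB, pvGoB, h, ih]
      · simp [pvLoopA, pvSpanB, h, ih]

-- before the first header A only discards lines, exactly as B's skip does
theorem pvLoopA_none (ls : List String) :
    ∀ (pkg : PySem.Dict String String) (cl : List String),
    pvLoopA ls pkg none cl = pvGoB (pvSkipB ls) pkg := by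
  induction ls with
  | nil => intro pkg cl; simp [pvLoopA, pvSkipB, pvGoB]
  | cons l tl ih =>
      intro pkg cl
      by_cases h : pvIsHeader l = true
      · simp [pvLoopA, pvSkipB, pvGoB, h, pvLoopA_some]
      · simp [pvLoopA, pvSkipB, h, ih]

-- ===== VERDICT (by name: the statement is the Claim_ definition above) =====
theorem build_package_py_spec : Claim_equal_build_package_py := by
  intro preview _
  unfold Spec_build_package_py build_package_py build_package_py_alt
  rw [pvLoopA_none]
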